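-- pv_equiv track=rewrite | github.com/goldsergeant/Algorithm-problem-solving | 백준/Gold/24955. 숫자 이어 붙이기/숫자 이어 붙이기.py | connect_num
-- ===== SOURCE A (Python) =====
-- def connect_num(a, b):
--     temp = b
--     b_digit = 0
--     while temp > 0:
--         b_digit += 1
--         temp //= 10
--     while b_digit > 0:
--         a *= 10
--         b_digit -= 1
--     return a + b
-- ===== SOURCE B (Python) =====
-- def connect_num(a, b):
--     if b <= 0:
--         return a + b
--     return connect_num(a, b // 10) * 10 + b % 10
-- ===== Notes on version B (the rewrite author's own statement) =====
-- stated objective: simpler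
-- what changed: Replaces A's two iterative loops (count b's digits, then repeatedly multiply a) with a direct recursion on b's decimal structure that rebuilds the concatenation digit by digit: connect_num(a, b//10)*10 + b%10, with no digit counter or multiplier maintained.
import Mathlib
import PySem

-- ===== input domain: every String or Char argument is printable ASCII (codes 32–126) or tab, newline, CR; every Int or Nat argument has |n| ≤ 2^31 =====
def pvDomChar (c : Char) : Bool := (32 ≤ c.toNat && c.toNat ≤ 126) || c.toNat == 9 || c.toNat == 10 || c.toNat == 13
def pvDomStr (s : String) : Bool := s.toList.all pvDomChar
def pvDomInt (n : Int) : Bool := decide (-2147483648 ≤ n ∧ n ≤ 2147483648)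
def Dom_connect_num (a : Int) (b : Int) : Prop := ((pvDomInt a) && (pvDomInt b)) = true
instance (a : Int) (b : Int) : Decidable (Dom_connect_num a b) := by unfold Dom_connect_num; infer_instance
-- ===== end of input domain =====

-- B replaces A's two iterative loops (count b's digits, then repeatedly multiply a) with a
-- direct recursion on b's decimal structure, rebuilding the concatenation digit by digit
-- (objective: simpler).

-- ===== PORT A =====
-- first while loop: count the digits of b
def pvCountLoop (temp : Int) (b_digit : Int) : Int :=
  if temp > 0 then pvCountLoop (PySem.Int.floordiv temp 10) (b_digit + 1) else b_digit
termination_by temp.toNat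
decreasing_by
  rw [PySem.Int.floordiv_eq_ediv_of_pos (by omega : (0:Int) < 10)]
  omega

-- second while loop: multiply a by 10, b_digit times
def pvShiftLoop (a : Int) (b_digit : Int) : Int :=
  if b_digit > 0 then pvShiftLoop (a * 10) (b_digit - 1) else a
termination_by b_digit.toNat
decreasing_by omega

def connect_num (a : Int) (b : Int) : Int :=
  pvShiftLoop a (pvCountLoop b 0) + b

-- ===== PORT B =====
-- recursion on b's decimal structure: base case b <= 0, otherwise recurse on b // 10 and
-- re-attach the last digit b % 10
def connect_num_alt (a : Int) (b : Int) : Int :=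
  if b ≤ 0 then a + b
  else connect_num_alt a (PySem.Int.floordiv b 10) * 10 + PySem.Int.mod b 10
termination_by b.toNat
decreasing_by
  rw [PySem.Int.floordiv_eq_ediv_of_pos (by omega : (0:Int) < 10)]
  omega

-- ===== PRECONDITION & SPEC =====
def Spec_connect_num (a : Int) (b : Int) (out : Int) : Prop := out = connect_num_alt a b
instance (a : Int) (b : Int) (out : Int) : Decidable (Spec_connect_num a b out) := by unfold Spec_connect_num; infer_instance

-- ===== CLAIM =====
def Claim_equal_connect_num : Prop := ∀ (a : Int) (b : Int), Dom_connect_num a b → Spec_connect_num a b (connect_num a b)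

-- ===== LEMMAS AND PROOFS =====

-- number of decimal digits of a positive integer (0 for non-positive): proof-side spec
def pvNdig (b : Int) : Nat :=
  if 0 < b then pvNdig (b / 10) + 1 else 0
termination_by b.toNat
decreasing_by omega

theorem pvCountLoop_eq (temp c : Int) : pvCountLoop temp c = c + (pvNdig temp : Int) := by
  fun_induction pvCountLoop temp c with
  | case1 temp c h ih =>
      rw [ih]
      conv_rhs => rw [pvNdig, if_pos h]
      rw [PySem.Int.floordiv_eq_ediv_of_pos (by omega : (0:Int) < 10)]
      push_cast
      ring
  | case2 temp c h =>
      rw [pvNdig, if_neg h]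
      simp

theorem pvShiftLoop_eq (n : Nat) (a : Int) : pvShiftLoop a (n : Int) = a * 10 ^ n := by
  induction n generalizing a with
  | zero => rw [pvShiftLoop]; simp
  | succ n ih =>
      rw [pvShiftLoop, if_pos (by omega)]
      have : ((n + 1 : Nat) : Int) - 1 = (n : Int) := by push_cast; ring
      rw [this, ih, pow_succ]
      ring

theorem connect_num_alt_eq (a b : Int) : connect_num_alt a b = a * 10 ^ pvNdig b + b := by
  fun_induction connect_num_alt a b with
  | case1 b h =>
      rw [pvNdig, if_neg (by omega)]
      simp
  | case2 b h ih =>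
      rw [ih, PySem.Int.floordiv_eq_ediv_of_pos (by omega : (0:Int) < 10),
          PySem.Int.mod_eq_emod_of_pos (by omega : (0:Int) < 10)]
      conv_rhs => rw [pvNdig, if_pos (by omega)]
      have hdm : b / 10 * 10 + b % 10 = b := by have := Int.ediv_add_emod b 10; omega
      rw [pow_succ]
      ring_nf
      ring_nf at hdm ⊢
      omega

-- ===== VERDICT =====
theorem connect_num_spec : Claim_equal_connect_num := by
  intro a b _
  unfold Spec_connect_num connect_num
  rw [pvCountLoop_eq, connect_num_alt_eq]
  have : (0 : Int) + (pvNdig b : Int) = ((pvNdig b : Nat) : Int) := by omega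
  rw [this, pvShiftLoop_eq]
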